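-- pv_equiv track=rewrite | github.com/valik94/PythonProblems | labs109.py | max_checkers_capture
-- ===== SOURCE A (Python) =====
-- __cdirs = [(-1, 1), (1, 1), (1, -1), (-1, -1)]
--
-- def __inside(x, y, n):
--     return 0 <= x < n and 0 <= y < n
--
-- def max_checkers_capture(n, x, y, pieces):
--     best = 0
--     for (dx, dy) in __cdirs:
--         if __inside(x + 2*dx, y + 2*dy, n) and (x + 2*dx, y + 2*dy) not in pieces and (x + dx, y + dy) in pieces:
--             pieces.remove((x + dx, y + dy))
--             best = max(best, 1 + max_checkers_capture(n, x + 2 * dx, y + 2 * dy, pieces))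
--             pieces.add((x + dx, y + dy))
--     return best
-- ===== SOURCE B (Python) =====
-- def max_checkers_capture(n, x, y, pieces):
--     best = 0
--     stack = [(x, y, frozenset(), 0)]
--     while stack:
--         cx, cy, cap, c = stack.pop()
--         for dx, dy in ((-1, 1), (1, 1), (1, -1), (-1, -1)):
--             mid = (cx + dx, cy + dy)
--             lx, ly = cx + 2 * dx, cy + 2 * dy
--             if (mid in pieces and mid not in cap
--                     and 0 <= lx < n and 0 <= ly < n
--                     and ((lx, ly) not in pieces or (lx, ly) in cap)):
--                 best = max(best, c + 1)
--                 stack.append((lx, ly, cap | {mid}, c + 1))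
--     return best
-- ===== Notes on version B (the rewrite author's own statement) =====
-- stated objective: alternative
-- what changed: Replaces A's recursive backtracking that mutates the pieces set (remove/recurse/re-add) by an iterative explicit-stack DFS over the immutable pieces plus a per-path frozenset of captured squares, tracking the best chain length as states are pushed.
import Mathlib
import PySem

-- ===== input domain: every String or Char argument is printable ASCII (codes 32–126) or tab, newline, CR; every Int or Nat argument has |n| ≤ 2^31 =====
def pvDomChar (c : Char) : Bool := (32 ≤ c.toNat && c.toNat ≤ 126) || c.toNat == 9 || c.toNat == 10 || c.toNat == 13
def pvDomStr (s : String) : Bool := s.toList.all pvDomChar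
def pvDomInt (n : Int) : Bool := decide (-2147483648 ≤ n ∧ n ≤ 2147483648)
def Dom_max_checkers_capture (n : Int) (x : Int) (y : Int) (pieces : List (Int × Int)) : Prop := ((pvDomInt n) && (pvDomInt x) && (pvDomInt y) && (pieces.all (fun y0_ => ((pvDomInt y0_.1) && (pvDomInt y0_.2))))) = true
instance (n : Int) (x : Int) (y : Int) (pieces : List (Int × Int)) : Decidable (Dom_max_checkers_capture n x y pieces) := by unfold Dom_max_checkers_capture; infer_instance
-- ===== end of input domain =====

-- B replaces A's recursive backtracking (which temporarily mutates the pieces set and restores it,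
-- so A has no net side effect) by an iterative explicit-stack DFS over the immutable pieces plus a
-- per-path captured set; B never mutates pieces. Objective: alternative decomposition, same cost.

-- ===== PORT A =====
-- Python `__inside(x, y, n)`
def pvInside (x y n : Int) : Bool := decide (0 ≤ x) && decide (x < n) && decide (0 ≤ y) && decide (y < n)

-- termination fact the port cites in `decreasing_by` (pieces.remove removes a member of the set)
theorem pv_discard_lt {a : Int × Int} {l : List (Int × Int)} (h : PySem.Set.contains l a = true) :
    (PySem.Set.discard l a).length < l.length := by
  simp only [PySem.Set.contains, List.contains_iff_mem] at h
  simp only [PySem.Set.discard]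
  exact List.length_filter_lt_length_iff_exists.mpr ⟨a, h, by simp⟩

-- A, transliterated: the loop over the 4-element constant __cdirs = [(-1,1),(1,1),(1,-1),(-1,-1)]
-- is unrolled in order; `pieces.remove(m)` (guarded by `m in pieces`) is PySem.Set.discard, and the
-- matching `pieces.add(m)` restores the set, so each direction's test uses the original `pieces`.
def max_checkers_capture (n : Int) (x : Int) (y : Int) (pieces : List (Int × Int)) : Int :=
  let b0 : Int := 0
  let b1 := if h1 : (pvInside (x + 2*(-1)) (y + 2*1) n && !(PySem.Set.contains pieces (x + 2*(-1), y + 2*1)) && PySem.Set.contains pieces (x + (-1), y + 1)) = true then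
      max b0 (1 + max_checkers_capture n (x + 2*(-1)) (y + 2*1) (PySem.Set.discard pieces (x + (-1), y + 1)))
    else b0
  let b2 := if h2 : (pvInside (x + 2*1) (y + 2*1) n && !(PySem.Set.contains pieces (x + 2*1, y + 2*1)) && PySem.Set.contains pieces (x + 1, y + 1)) = true then
      max b1 (1 + max_checkers_capture n (x + 2*1) (y + 2*1) (PySem.Set.discard pieces (x + 1, y + 1)))
    else b1
  let b3 := if h3 : (pvInside (x + 2*1) (y + 2*(-1)) n && !(PySem.Set.contains pieces (x + 2*1, y + 2*(-1))) && PySem.Set.contains pieces (x + 1, y + (-1))) = true then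
      max b2 (1 + max_checkers_capture n (x + 2*1) (y + 2*(-1)) (PySem.Set.discard pieces (x + 1, y + (-1))))
    else b2
  let b4 := if h4 : (pvInside (x + 2*(-1)) (y + 2*(-1)) n && !(PySem.Set.contains pieces (x + 2*(-1), y + 2*(-1))) && PySem.Set.contains pieces (x + (-1), y + (-1))) = true then
      max b3 (1 + max_checkers_capture n (x + 2*(-1)) (y + 2*(-1)) (PySem.Set.discard pieces (x + (-1), y + (-1))))
    else b3
  b4
termination_by pieces.length
decreasing_by
  · simp only [Bool.and_eq_true] at h1; exact pv_discard_lt h1.2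
  · simp only [Bool.and_eq_true] at h2; exact pv_discard_lt h2.2
  · simp only [Bool.and_eq_true] at h3; exact pv_discard_lt h3.2
  · simp only [Bool.and_eq_true] at h4; exact pv_discard_lt h4.2

-- ===== PORT B =====
-- the tuple of directions in Source B
def pvDirs : List (Int × Int) := [(-1, 1), (1, 1), (1, -1), (-1, -1)]

-- the `if` condition of Source B's inner loop (mid jumpable, landing on the board and effectively empty)
def pvCond (n : Int) (pieces cap : List (Int × Int)) (mid land : Int × Int) : Bool :=
  PySem.Set.contains pieces mid && !PySem.Set.contains cap mid &&
    pvInside land.1 land.2 n && (!PySem.Set.contains pieces land || PySem.Set.contains cap land)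

-- the states Source B pushes while processing one popped state (in direction order)
def pvChildren (n : Int) (pieces : List (Int × Int)) (st : Int × Int × List (Int × Int) × Int) :
    List (Int × Int × List (Int × Int) × Int) :=
  pvDirs.foldr (fun d acc =>
    if pvCond n pieces st.2.2.1 (st.1 + d.1, st.2.1 + d.2) (st.1 + 2*d.1, st.2.1 + 2*d.2) then
      (st.1 + 2*d.1, st.2.1 + 2*d.2, PySem.Set.add st.2.2.1 (st.1 + d.1, st.2.1 + d.2), st.2.2.2 + 1) :: acc
    else acc) []

-- Source B's `while stack:` loop; each push updates best to max(best, c+1); pop takes the last push,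
-- so the children are consed in reverse direction order.  The fuel argument only makes the loop
-- total in Lean (5^|pieces| always suffices, as the equivalence proof shows); Source B has no fuel.
def pvLoop (n : Int) (pieces : List (Int × Int)) :
    Nat → Int → List (Int × Int × List (Int × Int) × Int) → Int
  | _, best, [] => best
  | 0, best, _ :: _ => best
  | fuel + 1, best, st :: rest =>
      let ch := pvChildren n pieces st
      pvLoop n pieces fuel (ch.foldl (fun b c' => max b c'.2.2.2) best) (ch.reverse ++ rest)

def max_checkers_capture_alt (n : Int) (x : Int) (y : Int) (pieces : List (Int × Int)) : Int :=
  pvLoop n pieces (5 ^ pieces.length) 0 [(x, y, ([] : List (Int × Int)), (0 : Int))]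

-- ===== PRECONDITION & SPEC =====
def Spec_max_checkers_capture (n : Int) (x : Int) (y : Int) (pieces : List (Int × Int)) (out : Int) : Prop := out = max_checkers_capture_alt n x y pieces
instance (n : Int) (x : Int) (y : Int) (pieces : List (Int × Int)) (out : Int) : Decidable (Spec_max_checkers_capture n x y pieces out) := by unfold Spec_max_checkers_capture; infer_instance

-- ===== CLAIM (what is proved, stated in full; the proofs are below) =====
def Claim_equal_max_checkers_capture : Prop := ∀ (n : Int) (x : Int) (y : Int) (pieces : List (Int × Int)), Dom_max_checkers_capture n x y pieces → Spec_max_checkers_capture n x y pieces (max_checkers_capture n x y pieces)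

-- ===== LEMMAS AND PROOFS =====

-- the set A's recursion actually works on: the original pieces minus the captured squares
def pvDset (pieces cap : List (Int × Int)) : List (Int × Int) :=
  pieces.filter (fun p => !PySem.Set.contains cap p)

theorem pv_contains_dset (pieces cap : List (Int × Int)) (a : Int × Int) :
    PySem.Set.contains (pvDset pieces cap) a =
      (PySem.Set.contains pieces a && !PySem.Set.contains cap a) := by
  simp only [pvDset, PySem.Set.contains, List.contains_iff_mem, List.mem_filter]
  cases hp : decide (a ∈ pieces) <;> cases hc : List.contains cap a <;>
    simp_all [List.contains_iff_mem]

theorem pv_dset_nil (pieces : List (Int × Int)) : pvDset pieces [] = pieces := by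
  simp [pvDset, PySem.Set.contains]


theorem pv_contains_add (cap : List (Int × Int)) (m p : Int × Int) :
    PySem.Set.contains (PySem.Set.add cap m) p = (PySem.Set.contains cap p || p == m) := by
  simp only [PySem.Set.add]
  by_cases h : PySem.Set.contains cap m = true
  · simp only [h, if_pos]
    cases hq : p == m
    · simp
    · have : p = m := by simpa using hq
      subst this
      simpa [PySem.Set.contains, List.contains_iff_mem] using h
  · simp only [h, if_neg, Bool.not_eq_true] at *
    simp only [PySem.Set.contains, List.contains_iff_mem, List.mem_append, List.mem_singleton]
    by_cases hm : p ∈ cap <;> by_cases he : p = m <;> simp_all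

theorem pv_dset_discard (pieces cap : List (Int × Int)) (m : Int × Int) :
    PySem.Set.discard (pvDset pieces cap) m = pvDset pieces (PySem.Set.add cap m) := by
  simp only [pvDset, PySem.Set.discard, List.filter_filter]
  apply List.filter_congr
  intro p _
  rw [pv_contains_add]
  cases hq : p == m <;> cases hc : PySem.Set.contains cap p <;> simp

theorem pv_A_nonneg (n x y : Int) (pieces : List (Int × Int)) :
    0 ≤ max_checkers_capture n x y pieces := by
  rw [max_checkers_capture]
  split_ifs <;> simp [le_max_iff]

-- A's condition for one direction equals Source B's condition, read on pieces-minus-captured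
theorem pv_cond_eq (n : Int) (pieces cap : List (Int × Int)) (mx my lx ly : Int) :
    (pvInside lx ly n && !(PySem.Set.contains (pvDset pieces cap) (lx, ly)) &&
      PySem.Set.contains (pvDset pieces cap) (mx, my)) = pvCond n pieces cap (mx, my) (lx, ly) := by
  simp only [pv_contains_dset, pvCond]
  generalize pvInside lx ly n = I
  generalize PySem.Set.contains pieces (mx, my) = Pm
  generalize PySem.Set.contains cap (mx, my) = Cm
  generalize PySem.Set.contains pieces (lx, ly) = Pl
  generalize PySem.Set.contains cap (lx, ly) = Cl
  cases I <;> cases Pm <;> cases Cm <;> cases Pl <;> cases Cl <;> rfl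

-- A on pieces-minus-captured satisfies the recurrence over Source B's children of the state
theorem pv_A_children (n cx cy c : Int) (pieces cap : List (Int × Int)) :
    max_checkers_capture n cx cy (pvDset pieces cap) =
      (pvChildren n pieces (cx, cy, cap, c)).foldl
        (fun b e => max b (1 + max_checkers_capture n e.1 e.2.1 (pvDset pieces e.2.2.1))) 0 := by
  rw [max_checkers_capture]
  simp only [pv_cond_eq]
  simp only [pvChildren, pvDirs, List.foldr_cons, List.foldr_nil]
  split_ifs <;> simp [pv_dset_discard, List.foldl_cons, List.foldl_nil]

-- facts about every pushed child
theorem pv_children_spec (n cx cy c : Int) (pieces cap : List (Int × Int))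
    (e : Int × Int × List (Int × Int) × Int) (he : e ∈ pvChildren n pieces (cx, cy, cap, c)) :
    ∃ mid, mid ∈ pieces ∧ mid ∉ cap ∧ e.2.2.1 = PySem.Set.add cap mid ∧ e.2.2.2 = c + 1 := by
  have H : ∀ (ds : List (Int × Int)) (e'),
      e' ∈ List.foldr (fun d acc =>
        if pvCond n pieces cap (cx + d.1, cy + d.2) (cx + 2*d.1, cy + 2*d.2) then
          (cx + 2*d.1, cy + 2*d.2, PySem.Set.add cap (cx + d.1, cy + d.2), c + 1) :: acc
        else acc) [] ds →
      ∃ mid, mid ∈ pieces ∧ mid ∉ cap ∧ e'.2.2.1 = PySem.Set.add cap mid ∧ e'.2.2.2 = c + 1 := by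
    intro ds
    induction ds with
    | nil => intro e' he'; simp at he'
    | cons d t ih =>
        intro e' he'
        simp only [List.foldr_cons] at he'
        by_cases h : pvCond n pieces cap (cx + d.1, cy + d.2) (cx + 2*d.1, cy + 2*d.2) = true
        · rw [if_pos h] at he'
          rcases List.mem_cons.mp he' with he' | he'
          · subst he'
            simp only [pvCond, Bool.and_eq_true, Bool.not_eq_true',
              PySem.Set.contains, List.contains_iff_mem, decide_eq_true_eq,
              decide_eq_false_iff_not] at h
            refine ⟨(cx + d.1, cy + d.2), h.1.1.1, ?_, rfl, rfl⟩
            have := h.1.1.2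
            simpa [List.contains_iff_mem] using this
          · exact ih e' he'
        · rw [if_neg h] at he'
          exact ih e' he'
  exact H pvDirs e he

theorem pv_children_len (n cx cy c : Int) (pieces cap : List (Int × Int)) :
    (pvChildren n pieces (cx, cy, cap, c)).length ≤ 4 := by
  have H : ∀ (ds : List (Int × Int)),
      (List.foldr (fun d acc =>
        if pvCond n pieces cap (cx + d.1, cy + d.2) (cx + 2*d.1, cy + 2*d.2) then
          (cx + 2*d.1, cy + 2*d.2, PySem.Set.add cap (cx + d.1, cy + d.2), c + 1) :: acc
        else acc) ([] : List (Int × Int × List (Int × Int) × Int)) ds).length ≤ ds.length := by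
    intro ds
    induction ds with
    | nil => simp
    | cons d t ih =>
        simp only [List.foldr_cons, List.length_cons]
        split_ifs with h
        · simpa using Nat.succ_le_succ ih
        · exact Nat.le_succ_of_le ih
  exact H pvDirs

-- fold-of-max toolkit
def pvM (b : Int) (l : List Int) : Int := l.foldl max b

theorem pvM_swap (l : List Int) : ∀ a b, pvM (max a b) l = max a (pvM b l) := by
  induction l with
  | nil => intro a b; rfl
  | cons v t ih =>
      intro a b
      simp only [pvM, List.foldl_cons] at *
      rw [max_assoc]
      exact ih a (max b v)

theorem pvM_base_le (l : List Int) : ∀ b, b ≤ pvM b l := by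
  induction l with
  | nil => intro b; simp [pvM]
  | cons v t ih =>
      intro b
      simp only [pvM, List.foldl_cons] at *
      exact le_trans (le_max_left b v) (ih (max b v))

theorem pvM_add (l : List Int) : ∀ c v, pvM (c + v) (l.map (fun u => c + u)) = c + pvM v l := by
  induction l with
  | nil => intro c v; rfl
  | cons u t ih =>
      intro c v
      simp only [pvM, List.map_cons, List.foldl_cons] at *
      rw [max_add_add_left]
      exact ih c (max v u)

theorem pvM_const (l : List Int) (v : Int) : ∀ b, (∀ u ∈ l, u = v) → l ≠ [] → pvM b l = max b v := by
  induction l with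
  | nil => intro b _ h; exact absurd rfl h
  | cons u t ih =>
      intro b hall hne
      have hu : u = v := hall u (by simp)
      subst hu
      cases t with
      | nil => rfl
      | cons w t' =>
          simp only [pvM, List.foldl_cons] at *
          have := ih (max b u) (fun z hz => hall z (by simp [hz])) (by simp)
          simp only [pvM, List.foldl_cons] at this
          rw [this, max_assoc, max_self]

-- the weight that bounds the fuel: a state whose captured set has k elements weighs 5^(|pieces|-k)
def pvW (len : Nat) (stack : List (Int × Int × List (Int × Int) × Int)) : Nat :=
  (stack.map (fun st => 5 ^ (len - st.2.2.1.length))).sum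

def pvInv (pieces : List (Int × Int)) (best : Int) (st : Int × Int × List (Int × Int) × Int) : Prop :=
  st.2.2.1.Nodup ∧ st.2.2.1 ⊆ pieces ∧ st.2.2.2 ≤ best

def pvVal (n : Int) (pieces : List (Int × Int)) (st : Int × Int × List (Int × Int) × Int) : Int :=
  st.2.2.2 + max_checkers_capture n st.1 st.2.1 (pvDset pieces st.2.2.1)


theorem pv_add_len {cap : List (Int × Int)} {m : Int × Int} (h : m ∉ cap) :
    (PySem.Set.add cap m).length = cap.length + 1 := by
  simp [PySem.Set.add, PySem.Set.contains, List.contains_iff_mem, h]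

theorem pv_add_nodup {cap : List (Int × Int)} {m : Int × Int} (hn : cap.Nodup) (h : m ∉ cap) :
    (PySem.Set.add cap m).Nodup := by
  simp [PySem.Set.add, PySem.Set.contains, List.contains_iff_mem, h, List.nodup_append, hn]
  intro a b hab heq
  exact h (heq ▸ hab)

theorem pv_add_subset {cap pieces : List (Int × Int)} {m : Int × Int}
    (hs : cap ⊆ pieces) (hm : m ∈ pieces) : PySem.Set.add cap m ⊆ pieces := by
  simp only [PySem.Set.add]
  split_ifs
  · exact hs
  · intro a ha
    rcases List.mem_append.mp ha with h | h
    · exact hs h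
    · simp only [List.mem_singleton] at h
      exact h ▸ hm

theorem pvM_reverse (l : List Int) : ∀ b, pvM b l.reverse = pvM b l := by
  induction l with
  | nil => intro b; rfl
  | cons v t ih =>
      intro b
      calc pvM b (v :: t).reverse = pvM b (t.reverse ++ [v]) := by rw [List.reverse_cons]
        _ = max (pvM b t.reverse) v := by simp [pvM, List.foldl_append]
        _ = max (pvM b t) v := by rw [ih]
        _ = pvM b (v :: t) := by
              show _ = pvM (max b v) t
              rw [max_comm b v, pvM_swap, max_comm]

theorem pv_fold_pvM (l : List (Int × Int × List (Int × Int) × Int)) (b : Int)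
    (f : Int × Int × List (Int × Int) × Int → Int) :
    l.foldl (fun b st => max b (f st)) b = pvM b (l.map f) := by
  rw [pvM, List.foldl_map]

-- one pop of Source B's loop preserves the foldl-of-values characterisation
theorem pv_step (n cx cy c best : Int) (fuel : Nat) (pieces cap : List (Int × Int))
    (rest ch : List (Int × Int × List (Int × Int) × Int))
    (hch : pvChildren n pieces (cx, cy, cap, c) = ch)
    (hmeta : ∀ e ∈ ch, e.2.2.1.Nodup ∧ e.2.2.1 ⊆ pieces ∧
      e.2.2.1.length = cap.length + 1 ∧ e.2.2.2 = c + 1)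
    (hlen4 : ch.length ≤ 4)
    (hA : max_checkers_capture n cx cy (pvDset pieces cap) =
      ch.foldl (fun b e => max b (1 + max_checkers_capture n e.1 e.2.1 (pvDset pieces e.2.2.1))) 0)
    (hnd : cap.Nodup) (hsub : cap ⊆ pieces) (hcb : c ≤ best)
    (hinv : ∀ st ∈ rest, pvInv pieces best st)
    (hw : pvW pieces.length ((cx, cy, cap, c) :: rest) ≤ fuel + 1)
    (ih : ∀ (b : Int) (stack : List (Int × Int × List (Int × Int) × Int)),
      (∀ st ∈ stack, pvInv pieces b st) → pvW pieces.length stack ≤ fuel →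
      pvLoop n pieces fuel b stack = stack.foldl (fun b st => max b (pvVal n pieces st)) b) :
    pvLoop n pieces (fuel + 1) best ((cx, cy, cap, c) :: rest) =
      ((cx, cy, cap, c) :: rest).foldl (fun b st => max b (pvVal n pieces st)) best := by
  have hstep : pvLoop n pieces (fuel + 1) best ((cx, cy, cap, c) :: rest) =
      pvLoop n pieces fuel (ch.foldl (fun b c' => max b c'.2.2.2) best) (ch.reverse ++ rest) := by
    rw [show pvLoop n pieces (fuel + 1) best ((cx, cy, cap, c) :: rest) =
      pvLoop n pieces fuel
        ((pvChildren n pieces (cx, cy, cap, c)).foldl (fun b c' => max b c'.2.2.2) best)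
        ((pvChildren n pieces (cx, cy, cap, c)).reverse ++ rest) from rfl, hch]
  rw [hstep]
  have hval0 : pvVal n pieces (cx, cy, cap, c) =
      c + max_checkers_capture n cx cy (pvDset pieces cap) := rfl
  cases hch0 : ch with
  | nil =>
      subst hch0
      have hA0 : max_checkers_capture n cx cy (pvDset pieces cap) = 0 := by simpa using hA
      have hW : pvW pieces.length rest ≤ fuel := by
        have h1 : pvW pieces.length ((cx, cy, cap, c) :: rest) =
            5 ^ (pieces.length - cap.length) + pvW pieces.length rest := by simp [pvW]
        have h2 : 0 < 5 ^ (pieces.length - cap.length) := by positivity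
        omega
      rw [List.reverse_nil, List.nil_append, List.foldl_nil, ih best rest hinv hW,
        List.foldl_cons, hval0, hA0]
      have : max best (c + 0) = best := by omega
      rw [this]
  | cons e0 ct =>
      subst hch0
      -- best after the pushes
      have hbest1 : (e0 :: ct).foldl (fun b c' => max b c'.2.2.2) best = max best (c + 1) := by
        rw [pv_fold_pvM]
        apply pvM_const
        · intro u hu
          obtain ⟨e, he, hu'⟩ := List.mem_map.mp hu
          rw [← hu']
          exact (hmeta e he).2.2.2
        · simp
      -- the captured set strictly grows inside pieces
      have hcaplt : cap.length < pieces.length := by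
        obtain ⟨hn1, hs1, hl1, _⟩ := hmeta e0 (by simp)
        have h3 := (hn1.subperm hs1).length_le
        omega
      -- fuel accounting
      have hfuel : pvW pieces.length ((e0 :: ct).reverse ++ rest) ≤ fuel := by
        have hsplit : pvW pieces.length ((e0 :: ct).reverse ++ rest) =
            pvW pieces.length (e0 :: ct).reverse + pvW pieces.length rest := by
          simp [pvW]
          omega
        have hsum : pvW pieces.length (e0 :: ct).reverse =
            (e0 :: ct).reverse.length * 5 ^ (pieces.length - cap.length - 1) := by
          rw [pvW, List.sum_eq_card_nsmul _ _ ?_, smul_eq_mul, List.length_map]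
          intro x hx
          obtain ⟨e, he, hx'⟩ := List.mem_map.mp hx
          obtain ⟨_, _, hl1, _⟩ := hmeta e (List.mem_reverse.mp he)
          rw [← hx', hl1]
          congr 1
        have hmul : (e0 :: ct).reverse.length * 5 ^ (pieces.length - cap.length - 1) ≤
            4 * 5 ^ (pieces.length - cap.length - 1) := by
          apply Nat.mul_le_mul_right
          simpa using hlen4
        have hpow : 5 ^ (pieces.length - cap.length) =
            5 ^ (pieces.length - cap.length - 1) * 5 := by
          rw [← pow_succ]
          congr 1
          omega
        have hpos : 0 < 5 ^ (pieces.length - cap.length - 1) := by positivity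
        have hw1 : pvW pieces.length ((cx, cy, cap, c) :: rest) =
            5 ^ (pieces.length - cap.length) + pvW pieces.length rest := by simp [pvW]
        omega
      -- invariants for the new stack
      have hinv' : ∀ st ∈ (e0 :: ct).reverse ++ rest, pvInv pieces (max best (c + 1)) st := by
        intro e he
        rcases List.mem_append.mp he with he | he
        · obtain ⟨hn1, hs1, _, hc1⟩ := hmeta e (List.mem_reverse.mp he)
          exact ⟨hn1, hs1, by rw [hc1]; exact le_max_right _ _⟩
        · obtain ⟨hn1, hs1, hc1⟩ := hinv e he
          exact ⟨hn1, hs1, le_trans hc1 (le_max_left _ _)⟩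
      rw [hbest1, ih (max best (c + 1)) _ hinv' hfuel]
      -- pure algebra on folds of max
      rw [List.foldl_append, List.foldl_cons]
      have hkey : List.foldl (fun b st => max b (pvVal n pieces st)) (max best (c + 1))
          (e0 :: ct).reverse = max best (pvVal n pieces (cx, cy, cap, c)) := by
        rw [pv_fold_pvM, List.map_reverse, pvM_reverse, hval0, hA]
        rw [pv_fold_pvM _ 0 (fun e => 1 + max_checkers_capture n e.1 e.2.1 (pvDset pieces e.2.2.1))]
        have hmapval : (e0 :: ct).map (pvVal n pieces) =
            ((e0 :: ct).map (fun e => 1 + max_checkers_capture n e.1 e.2.1 (pvDset pieces e.2.2.1))).map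
              (fun u => c + u) := by
          rw [List.map_map]
          apply List.map_congr_left
          intro e he
          have hc1 := (hmeta e he).2.2.2
          show pvVal n pieces e = c + (1 + _)
          rw [pvVal, hc1]
          ring
        rw [hmapval]
        simp only [List.map_cons]
        have hL : pvM (max best (c + 1))
            ((c + (1 + max_checkers_capture n e0.1 e0.2.1 (pvDset pieces e0.2.2.1))) ::
              (ct.map (fun e => 1 + max_checkers_capture n e.1 e.2.1 (pvDset pieces e.2.2.1))).map
                (fun u => c + u)) =
            max (c + 1) (max best (c +
              pvM (1 + max_checkers_capture n e0.1 e0.2.1 (pvDset pieces e0.2.2.1))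
                (ct.map (fun e => 1 + max_checkers_capture n e.1 e.2.1 (pvDset pieces e.2.2.1))))) := by
          rw [max_comm best (c + 1), pvM_swap]
          congr 1
          show pvM (max best _) _ = _
          rw [pvM_swap]
          congr 1
          exact pvM_add _ c _
        rw [hL]
        have hA0 : 0 ≤ max_checkers_capture n e0.1 e0.2.1 (pvDset pieces e0.2.2.1) :=
          pv_A_nonneg _ _ _ _
        have hR : pvM 0 ((1 + max_checkers_capture n e0.1 e0.2.1 (pvDset pieces e0.2.2.1)) ::
            ct.map (fun e => 1 + max_checkers_capture n e.1 e.2.1 (pvDset pieces e.2.2.1))) =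
            pvM (1 + max_checkers_capture n e0.1 e0.2.1 (pvDset pieces e0.2.2.1))
              (ct.map (fun e => 1 + max_checkers_capture n e.1 e.2.1 (pvDset pieces e.2.2.1))) := by
          show pvM (max 0 _) _ = _
          congr 1
          omega
        rw [hR]
        have hge : c + 1 ≤ c + pvM (1 + max_checkers_capture n e0.1 e0.2.1 (pvDset pieces e0.2.2.1))
            (ct.map (fun e => 1 + max_checkers_capture n e.1 e.2.1 (pvDset pieces e.2.2.1))) := by
          have := pvM_base_le
            (ct.map (fun e => 1 + max_checkers_capture n e.1 e.2.1 (pvDset pieces e.2.2.1)))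
            (1 + max_checkers_capture n e0.1 e0.2.1 (pvDset pieces e0.2.2.1))
          omega
        exact max_eq_right (le_trans hge (le_max_right _ _))
      rw [hkey]

theorem pv_loop_eq (n : Int) (pieces : List (Int × Int)) : ∀ (fuel : Nat) (best : Int)
    (stack : List (Int × Int × List (Int × Int) × Int)),
    (∀ st ∈ stack, pvInv pieces best st) → pvW pieces.length stack ≤ fuel →
    pvLoop n pieces fuel best stack = stack.foldl (fun b st => max b (pvVal n pieces st)) best := by
  intro fuel
  induction fuel with
  | zero =>
      intro best stack hinv hw
      cases stack with
      | nil => rfl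
      | cons st rest =>
          exfalso
          have h1 : 0 < 5 ^ (pieces.length - st.2.2.1.length) := by positivity
          have h2 : pvW pieces.length (st :: rest) =
              5 ^ (pieces.length - st.2.2.1.length) + pvW pieces.length rest := by simp [pvW]
          omega
  | succ fuel ih =>
      intro best stack hinv hw
      cases stack with
      | nil => rfl
      | cons st rest =>
          obtain ⟨cx, cy, cap, c⟩ := st
          obtain ⟨hnd, hsub, hcb⟩ := hinv _ List.mem_cons_self
          have hmeta : ∀ e ∈ pvChildren n pieces (cx, cy, cap, c), e.2.2.1.Nodup ∧
              e.2.2.1 ⊆ pieces ∧ e.2.2.1.length = cap.length + 1 ∧ e.2.2.2 = c + 1 := by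
            intro e he
            obtain ⟨mid, hm1, hm2, hcap, hc⟩ := pv_children_spec n cx cy c pieces cap e he
            refine ⟨?_, ?_, ?_, hc⟩ <;> rw [hcap]
            · exact pv_add_nodup hnd hm2
            · exact pv_add_subset hsub hm1
            · exact pv_add_len hm2
          exact pv_step n cx cy c best fuel pieces cap rest _ rfl hmeta
            (pv_children_len n cx cy c pieces cap) (pv_A_children n cx cy c pieces cap)
            hnd hsub hcb (fun st hst => hinv st (List.mem_cons_of_mem _ hst)) hw ih

-- ===== VERDICT (by name: the statement is the Claim_ definition above) =====
theorem max_checkers_capture_spec : Claim_equal_max_checkers_capture := by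
  intro n x y pieces _
  show max_checkers_capture n x y pieces = max_checkers_capture_alt n x y pieces
  rw [max_checkers_capture_alt,
    pv_loop_eq n pieces (5 ^ pieces.length) 0 [(x, y, [], 0)]
      (by
        intro st hst
        simp only [List.mem_singleton] at hst
        subst hst
        exact ⟨List.nodup_nil, List.nil_subset _, le_refl 0⟩)
      (by simp [pvW])]
  simp only [List.foldl_cons, List.foldl_nil, pvVal, pv_dset_nil, zero_add]
  exact (max_eq_right (pv_A_nonneg n x y pieces)).symm
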